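-- pv_equiv track=rewrite | github.com/nyrkik/quantum-pools | app/src/services/inspection/pdf_extractor.py | _extract_notes
-- ===== SOURCE A (Python) =====
-- from typing import Optional
--
-- def _extract_notes(text: str) -> Optional[str]:
--     """Extract general notes from the inspection report."""
--     notes = []
--     # Find text after "Notes" label on the notes page
--     lines = text.split("\n")
--     in_notes = False
--     for i, line in enumerate(lines):
--         stripped = line.strip()
--         if stripped == "Notes":
--             in_notes = True
--             continue
--         if in_notes:
--             # Stop at known labels
--             if stripped in ("Accepted By", "Reviewed", "Insp Phone", "Inspector", "Co-Inspector", "Tota"):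
--                 break
--             if stripped.startswith("Note - "):
--                 notes.append(stripped)
--             elif stripped and not stripped.startswith("Pag"):
--                 notes.append(stripped)
--
--     return "\n".join(notes).strip() if notes else None
-- ===== SOURCE B (Python) =====
-- from typing import Optional
--
-- _STOP = ("Accepted By", "Reviewed", "Insp Phone", "Inspector", "Co-Inspector", "Tota")
--
--
-- def _extract_notes(text: str) -> Optional[str]:
--     """Extract general notes from the inspection report."""
--     lines = [line.strip() for line in text.split("\n")]
--     if "Notes" not in lines:
--         return None
--     tail = lines[lines.index("Notes") + 1:]
--     stop = next((j for j, s in enumerate(tail) if s in _STOP), len(tail))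
--     kept = [s for s in tail[:stop] if s and s != "Notes" and not s.startswith("Pag")]
--     return "\n".join(kept).strip() if kept else None
-- ===== Notes on version B (the rewrite author's own statement) =====
-- stated objective: simpler
-- what changed: A's flag-based single loop with break and two append branches is replaced by a pipeline: strip all lines once, locate the first 'Notes' line by index, slice the tail, find the first stop-label index, and filter the collapsed keep-condition (non-empty, not 'Notes', not 'Pag'-prefixed).
import Mathlib
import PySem

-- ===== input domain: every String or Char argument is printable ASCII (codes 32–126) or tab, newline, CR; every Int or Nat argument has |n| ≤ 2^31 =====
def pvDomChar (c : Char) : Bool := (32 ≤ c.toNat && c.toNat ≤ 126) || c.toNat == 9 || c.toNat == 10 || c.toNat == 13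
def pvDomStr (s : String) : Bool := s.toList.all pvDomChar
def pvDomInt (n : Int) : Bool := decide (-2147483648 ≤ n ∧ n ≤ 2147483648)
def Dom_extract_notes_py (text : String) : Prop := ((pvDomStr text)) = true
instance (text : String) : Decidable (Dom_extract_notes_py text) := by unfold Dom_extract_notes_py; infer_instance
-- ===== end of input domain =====

-- B replaces A's flag-based single loop by a strip-once / locate-"Notes" / find-stop-index / filter pipeline (simpler decomposition, same cost).

-- ===== PORT A =====
def pvStop : List String := ["Accepted By", "Reviewed", "Insp Phone", "Inspector", "Co-Inspector", "Tota"]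

-- A's for-loop: state (in_notes, notes); `break` returns the accumulator.
def pvLoopA : List String → Bool → List String → List String
  | [], _, acc => acc
  | l :: ls, inn, acc =>
    let s := PySem.Str.strip l
    if s = "Notes" then pvLoopA ls true acc
    else if inn then
      if s ∈ pvStop then acc
      else if PySem.Str.startswith s "Note - " then pvLoopA ls true (acc ++ [s])
      else if s ≠ "" ∧ ¬ PySem.Str.startswith s "Pag" then pvLoopA ls true (acc ++ [s])
      else pvLoopA ls true acc
    else pvLoopA ls false acc

-- text.split("\n") never raises for a non-empty separator: split? is always `some` here, the getD [] fallback is unreachable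
def extract_notes_py (text : String) : Option String :=
  let notes := pvLoopA ((PySem.Str.split? text "\n").getD []) false []
  if notes = [] then none else some (PySem.Str.strip (PySem.Str.join "\n" notes))

-- ===== PORT B =====
-- the comprehension filter `s and s != "Notes" and not s.startswith("Pag")`
def pvKeep (s : String) : Bool := !(s == "") && !(s == "Notes") && !(PySem.Str.startswith s "Pag")

def extract_notes_py_alt (text : String) : Option String :=
  let lines := ((PySem.Str.split? text "\n").getD []).map PySem.Str.strip
  if "Notes" ∈ lines then
    match PySem.List.index? lines "Notes" with
    | none => none  -- unreachable: guarded by the membership test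
    | some i =>
      let tail := PySem.List.slice lines (some ((i : Int) + 1)) none
      let stop := tail.findIdx (fun s => decide (s ∈ pvStop))  -- next((j for j,s in ...), len(tail))
      let kept := (tail.take stop).filter pvKeep
      if kept = [] then none else some (PySem.Str.strip (PySem.Str.join "\n" kept))
  else none

-- ===== PRECONDITION & SPEC =====
def Spec_extract_notes_py (text : String) (out : Option String) : Prop := out = extract_notes_py_alt text
instance (text : String) (out : Option String) : Decidable (Spec_extract_notes_py text out) := by unfold Spec_extract_notes_py; infer_instance

-- ===== CLAIM (what is proved, stated in full; the proofs are below) =====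
def Claim_equal_extract_notes_py : Prop := ∀ (text : String), Dom_extract_notes_py text → Spec_extract_notes_py text (extract_notes_py text)

-- ===== LEMMAS AND PROOFS =====

-- a string starting with "Note - " is nonempty, is not "Notes", is in no stop label, and does not start with "Pag"
theorem pvNoteDash_facts (s : String) (h : PySem.Str.startswith s "Note - " = true) :
    s ≠ "" ∧ s ≠ "Notes" ∧ s ∉ pvStop ∧ PySem.Str.startswith s "Pag" = false := by
  simp only [PySem.Str.startswith_eq, PySem.Chars.startswith] at h ⊢
  rw [List.isPrefixOf_iff_prefix] at h
  obtain ⟨t, ht⟩ := h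
  refine ⟨?_, ?_, ?_, ?_⟩
  · intro hs; rw [hs] at ht; simp at ht
  · intro hs; rw [hs] at ht; simp at ht
  · simp only [pvStop, List.mem_cons, List.not_mem_nil, or_false]
    rintro (hs|hs|hs|hs|hs|hs) <;> (rw [hs] at ht; simp at ht)
  · rw [← ht]; simp [List.isPrefixOf]

-- take up to the first index satisfying p = takeWhile (¬ p)
theorem pvTake_findIdx {α : Type} (p : α → Bool) (l : List α) :
    l.take (l.findIdx p) = l.takeWhile (fun x => !p x) := by
  induction l with
  | nil => simp
  | cons x xs ih =>
    by_cases hx : p x <;> simp [List.findIdx_cons, hx, ih]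

-- phase 2: once in_notes, A collects exactly B's filter of the takeWhile
theorem pvLoopA_true (ls : List String) : ∀ acc,
    pvLoopA ls true acc =
      acc ++ ((ls.map PySem.Str.strip).takeWhile (fun s => !decide (s ∈ pvStop))).filter pvKeep := by
  induction ls with
  | nil => intro acc; simp [pvLoopA]
  | cons l ls ih =>
    intro acc
    simp only [pvLoopA, List.map_cons, List.takeWhile_cons]
    by_cases h1 : PySem.Str.strip l = "Notes"
    · rw [if_pos h1, ih, h1]
      have hm : (!decide (("Notes" : String) ∈ pvStop)) = true := by decide
      rw [if_pos hm, List.filter_cons_of_neg (by decide)]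
    · rw [if_neg h1, if_pos trivial]
      by_cases h2 : PySem.Str.strip l ∈ pvStop
      · rw [if_pos h2, if_neg (by simp [h2]), List.filter_nil, List.append_nil]
      · rw [if_neg h2]
        by_cases h3 : PySem.Str.startswith (PySem.Str.strip l) "Note - " = true
        · obtain ⟨f1, f2, f3, f4⟩ := pvNoteDash_facts _ h3
          have hk : pvKeep (PySem.Str.strip l) = true := by
            unfold pvKeep; rw [f4]; simp [f1, f2]
          rw [if_pos h3, ih, if_pos (by simp [h2]), List.filter_cons_of_pos hk]
          simp
        · rw [if_neg h3]
          by_cases h4 : PySem.Str.strip l ≠ "" ∧ ¬ PySem.Str.startswith (PySem.Str.strip l) "Pag" = true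
          · have hk : pvKeep (PySem.Str.strip l) = true := by
              unfold pvKeep
              rw [eq_false_of_ne_true h4.2]
              simp [h4.1, h1]
            rw [if_pos h4, ih, if_pos (by simp [h2]), List.filter_cons_of_pos hk]
            simp
          · have hk : pvKeep (PySem.Str.strip l) = false := by
              unfold pvKeep
              rcases not_and_or.mp h4 with h | h
              · simp [not_not.mp h]
              · rw [not_not.mp h]; simp
            rw [if_neg h4, ih, if_pos (by simp [h2]), List.filter_cons_of_neg (by simp [hk])]

-- phase 1: A skips to just past the first line stripping to "Notes"
theorem pvLoopA_false (ls : List String) : ∀ acc,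
    pvLoopA ls false acc =
      match PySem.List.index? (ls.map PySem.Str.strip) "Notes" with
      | none => acc
      | some i => pvLoopA (ls.drop (i + 1)) true acc := by
  induction ls with
  | nil => intro acc; simp [pvLoopA, PySem.List.index?]
  | cons l ls ih =>
    intro acc
    simp only [pvLoopA, List.map_cons]
    by_cases h1 : PySem.Str.strip l = "Notes"
    · rw [if_pos h1, h1, PySem.List.index?_cons_self]
      simp
    · rw [if_neg h1, if_neg (by simp), PySem.List.index?_cons_of_ne _ h1, ih]
      cases PySem.List.index? (ls.map PySem.Str.strip) "Notes" <;> simp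

-- the whole equivalence over an arbitrary line list
theorem pvMain (L : List String) :
    (let notes := pvLoopA L false [];
     if notes = [] then none else some (PySem.Str.strip (PySem.Str.join "\n" notes))) =
    (let lines := L.map PySem.Str.strip;
     if "Notes" ∈ lines then
       match PySem.List.index? lines "Notes" with
       | none => none
       | some i =>
         let tail := PySem.List.slice lines (some ((i : Int) + 1)) none
         let stop := tail.findIdx (fun s => decide (s ∈ pvStop))
         let kept := (tail.take stop).filter pvKeep
         if kept = [] then none else some (PySem.Str.strip (PySem.Str.join "\n" kept))
     else none) := by
  simp only [pvLoopA_false]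
  cases h : PySem.List.index? (L.map PySem.Str.strip) "Notes" with
  | none =>
    dsimp only
    have hm : "Notes" ∉ L.map PySem.Str.strip := (PySem.List.index?_eq_none_iff _ _).mp h
    rw [if_neg hm]
    simp
  | some i =>
    dsimp only
    have hm : "Notes" ∈ L.map PySem.Str.strip :=
      (PySem.List.index?_isSome_iff _ _).mp (by rw [h]; rfl)
    rw [if_pos hm]
    have hslice : PySem.List.slice (L.map PySem.Str.strip) (some ((i : Int) + 1)) none
        = (L.drop (i + 1)).map PySem.Str.strip := by
      have hcast : ((i : Int) + 1) = ((i + 1 : Nat) : Int) := by push_cast; ring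
      rw [hcast, PySem.List.slice_from_natCast, List.map_drop]
    simp only [hslice, pvLoopA_true, pvTake_findIdx, List.nil_append]

-- ===== VERDICT (by name: the statement is the Claim_ definition above) =====
theorem extract_notes_py_spec : Claim_equal_extract_notes_py := by
  intro text _
  unfold Spec_extract_notes_py extract_notes_py extract_notes_py_alt
  exact pvMain ((PySem.Str.split? text "\n").getD [])
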